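-- pv_equiv track=rewrite | github.com/pypi-data/pypi-mirror-392 | packages/brnltk/brnltk-3.2.2-py3-none-any.whl/brnltk/pos_tagger.py | find_nearest_word_by_ngram
-- ===== SOURCE A (Python) =====
-- def generate_ngrams(word, n):
--     """Generates n-grams for a given word."""
--     return [word[i:i+n] for i in range(len(word)-n+1)]
--
-- def find_nearest_word_by_ngram(unknown_word, known_words, n=3):
--     """Finds the nearest known word using n-gram overlap."""
--     target_ngrams = set(generate_ngrams(unknown_word, n))
--     max_overlap = 0
--     best_match = None
--     for w in known_words:
--         w_ngrams = set(generate_ngrams(w, n))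
--         overlap = len(target_ngrams & w_ngrams)
--         if overlap > max_overlap:
--             max_overlap = overlap
--             best_match = w
--     return best_match
-- ===== SOURCE B (Python) =====
-- def generate_ngrams(word, n):
--     """Generates n-grams for a given word."""
--     return [word[i:i+n] for i in range(len(word)-n+1)]
--
-- def find_nearest_word_by_ngram(unknown_word, known_words, n=3):
--     """Finds the nearest known word via an inverted n-gram index."""
--     words = list(known_words)
--     target = list(dict.fromkeys(generate_ngrams(unknown_word, n)))
--     # inverted index: n-gram -> indices of words containing it (once each)
--     index = {}
--     for i, w in enumerate(words):
--         for g in dict.fromkeys(generate_ngrams(w, n)):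
--             index.setdefault(g, []).append(i)
--     # accumulate each word's overlap with the target's distinct n-grams
--     counts = {}
--     for g in target:
--         for i in index.get(g, []):
--             counts[i] = counts.get(i, 0) + 1
--     max_overlap = 0
--     best_match = None
--     for i, w in enumerate(words):
--         c = counts.get(i, 0)
--         if c > max_overlap:
--             max_overlap = c
--             best_match = w
--     return best_match
-- ===== Notes on version B (the rewrite author's own statement) =====
-- stated objective: alternative
-- what changed: Replaces the per-word set-intersection loop by an inverted index (n-gram -> word indices) built once, from which each word's overlap is accumulated by walking the target's distinct n-grams, followed by a single first-wins max scan over the indexed counts.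
import Mathlib
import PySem

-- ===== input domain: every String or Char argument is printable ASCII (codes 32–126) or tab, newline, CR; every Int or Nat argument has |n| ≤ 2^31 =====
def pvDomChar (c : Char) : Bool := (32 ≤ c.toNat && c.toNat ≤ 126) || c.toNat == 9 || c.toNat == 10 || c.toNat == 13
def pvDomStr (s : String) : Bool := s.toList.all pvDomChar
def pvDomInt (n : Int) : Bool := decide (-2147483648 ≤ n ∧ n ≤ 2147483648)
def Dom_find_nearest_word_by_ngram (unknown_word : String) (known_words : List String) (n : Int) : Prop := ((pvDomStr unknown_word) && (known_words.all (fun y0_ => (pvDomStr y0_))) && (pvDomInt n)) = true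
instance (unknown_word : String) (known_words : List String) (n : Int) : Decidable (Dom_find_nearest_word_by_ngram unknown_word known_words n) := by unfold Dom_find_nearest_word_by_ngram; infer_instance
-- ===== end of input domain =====

-- B replaces A's per-word set-intersection loop by an inverted n-gram index plus a counts
-- accumulator and a final first-wins scan (alternative algorithm, same asymptotic cost).


-- ===== PORT A =====
-- helper of both Pythons: generate_ngrams(word, n) = [word[i:i+n] for i in range(len(word)-n+1)]
def generate_ngrams (word : String) (n : Int) : List String :=
  (PySem.List.pyRange 0 (PySem.Str.len word - n + 1) 1).map
    (fun i => PySem.Str.slice word (some i) (some (i + n)))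

def find_nearest_word_by_ngram (unknown_word : String) (known_words : List String) (n : Int) : Option String :=
  let target_ngrams := PySem.Set.ofList (generate_ngrams unknown_word n)
  let r := known_words.foldl
    (fun (st : Int × Option String) w =>
      let w_ngrams := PySem.Set.ofList (generate_ngrams w n)
      let overlap : Int := PySem.Set.len (PySem.Set.inter target_ngrams w_ngrams)
      if overlap > st.1 then (overlap, some w) else st)
    (0, none)
  r.2

-- ===== PORT B =====
def find_nearest_word_by_ngram_alt (unknown_word : String) (known_words : List String) (n : Int) : Option String :=
  let words := known_words
  let target := PySem.List.dedup (generate_ngrams unknown_word n)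
  -- index.setdefault(g, []).append(i)  =  modify g (default []) (· ++ [i])
  let index : PySem.Dict String (List Int) :=
    (PySem.List.enumerate words 0).foldl
      (fun d p =>
        (PySem.List.dedup (generate_ngrams p.2 n)).foldl
          (fun d g => d.modify g [] (fun l => l ++ [p.1])) d)
      PySem.Dict.empty
  let counts : PySem.Dict Int Int :=
    target.foldl
      (fun c g => (index.getD g []).foldl (fun c i => c.insert i (c.getD i 0 + 1)) c)
      PySem.Dict.empty
  let r := (PySem.List.enumerate words 0).foldl
    (fun (st : Int × Option String) p =>
      let c := counts.getD p.1 0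
      if c > st.1 then (c, some p.2) else st)
    (0, none)
  r.2

-- ===== PRECONDITION & SPEC =====
-- A is total on the domain (no Pre_).
def Spec_find_nearest_word_by_ngram (unknown_word : String) (known_words : List String) (n : Int) (out : Option String) : Prop := out = find_nearest_word_by_ngram_alt unknown_word known_words n
instance (unknown_word : String) (known_words : List String) (n : Int) (out : Option String) : Decidable (Spec_find_nearest_word_by_ngram unknown_word known_words n out) := by unfold Spec_find_nearest_word_by_ngram; infer_instance

-- ===== CLAIM (what is proved, stated in full; the proofs are below) =====
def Claim_equal_find_nearest_word_by_ngram : Prop := ∀ (unknown_word : String) (known_words : List String) (n : Int), Dom_find_nearest_word_by_ngram unknown_word known_words n → Spec_find_nearest_word_by_ngram unknown_word known_words n (find_nearest_word_by_ngram unknown_word known_words n)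

-- ===== LEMMAS AND PROOFS =====

-- the inner index-building fold over one word's distinct n-grams, at key g
lemma index_inner_fold (gs : List String) (d : PySem.Dict String (List Int)) (i : Int) (g : String) :
    (gs.foldl (fun d h => d.modify h [] (fun l => l ++ [i])) d).getD g []
      = d.getD g [] ++ List.replicate (gs.count g) i := by
  have h1 : gs.foldl (fun d h => d.modify h [] (fun l => l ++ [i])) d
      = (gs.map (fun h => (h, i))).foldl (fun d q => d.modify q.1 [] (fun l => l ++ [q.2])) d := by
    rw [List.foldl_map]
  rw [h1, PySem.Dict.getD_foldl_modify_append]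
  congr 1
  rw [List.filter_map, List.map_map]
  simp [Function.comp_def, List.map_const', List.count, List.countP_eq_length_filter]

-- the whole index-building double fold, at key g
lemma index_fold (n : Int) (ps : List (Int × String)) (d : PySem.Dict String (List Int)) (g : String) :
    (ps.foldl (fun d p =>
        (PySem.List.dedup (generate_ngrams p.2 n)).foldl
          (fun d h => d.modify h [] (fun l => l ++ [p.1])) d) d).getD g []
      = d.getD g [] ++ ps.flatMap (fun p => List.replicate ((PySem.List.dedup (generate_ngrams p.2 n)).count g) p.1) := by
  induction ps generalizing d with
  | nil => simp
  | cons p ps ih => rw [List.foldl_cons, ih, index_inner_fold]; simp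

-- the counts-building double fold, at key i
lemma counts_fold (gs : List String) (idx : String → List Int) (c : PySem.Dict Int Int) (i : Int) :
    (gs.foldl (fun c g => (idx g).foldl (fun c j => c.insert j (c.getD j 0 + 1)) c) c).getD i 0
      = c.getD i 0 + ((gs.map (fun g => (((idx g).count i : Nat) : Int))).sum) := by
  induction gs generalizing c with
  | nil => simp
  | cons g gs ih =>
    rw [List.foldl_cons, ih, PySem.Dict.getD_foldl_insert_add_one]
    simp only [List.map_cons, List.sum_cons]
    ring

-- in a list of pairs with strictly increasing first components, only the block keyed by p.1 contributes
lemma sum_ite_eq_single {β M : Type} [AddCommMonoid M] (F : Int × β → M)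
    (ps : List (Int × β)) (hps : ps.Pairwise (fun p q => p.1 < q.1)) (p : Int × β) (hp : p ∈ ps) :
    ((ps.map (fun q => if q.1 = p.1 then F q else 0)).sum) = F p := by
  induction ps with
  | nil => cases hp
  | cons q ps ih =>
    rcases List.pairwise_cons.mp hps with ⟨hq, hps'⟩
    rcases List.mem_cons.mp hp with h | h
    · subst h
      simp only [List.map_cons, List.sum_cons]
      have hz : ∀ r ∈ ps, (if r.1 = p.1 then F r else 0) = 0 := by
        intro r hr
        have := hq r hr
        simp [show ¬ r.1 = p.1 by omega]
      rw [List.map_congr_left hz]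
      simp
    · have hne : ¬ q.1 = p.1 := by have := hq p h; omega
      simp only [List.map_cons, List.sum_cons, if_neg hne, zero_add]
      exact ih hps' h

-- the final scan over enumerate equals a scan over the words themselves
lemma final_fold (ws : List String) (G : Int × Option String → String → Int × Option String) :
    ∀ (s : Int) (st : Int × Option String),
      (PySem.List.enumerate ws s).foldl (fun st p => G st p.2) st = ws.foldl G st := by
  induction ws with
  | nil => intro s st; rw [PySem.List.enumerate.eq_1]; rfl
  | cons w ws ih => intro s st; rw [PySem.List.enumerate.eq_2, List.foldl_cons, List.foldl_cons, ih]

-- nodup count as an indicator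
lemma count_nodup_ite {α : Type} [BEq α] [LawfulBEq α] (l : List α) (hl : l.Nodup) (a : α) :
    ((l.count a : Nat) : Int) = if l.contains a then 1 else 0 := by
  by_cases h : a ∈ l
  · rw [List.count_eq_one_of_mem hl h]; simp [h]
  · rw [List.count_eq_zero.mpr h]; simp [h]

-- the flatMap block structure of the index entry, counted at a given word index p.1
lemma flat_count (ws : List String) (n : Int) (p : Int × String)
    (hp : p ∈ PySem.List.enumerate ws 0) (g : String) :
    ((PySem.List.enumerate ws 0).flatMap (fun q =>
        List.replicate ((PySem.List.dedup (generate_ngrams q.2 n)).count g) q.1)).count p.1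
      = (PySem.List.dedup (generate_ngrams p.2 n)).count g := by
  rw [List.count_flatMap]
  have hmap : ((PySem.List.enumerate ws 0).map
        ((List.count p.1) ∘ (fun q => List.replicate ((PySem.List.dedup (generate_ngrams q.2 n)).count g) q.1)))
      = (PySem.List.enumerate ws 0).map
        (fun q => if q.1 = p.1 then (PySem.List.dedup (generate_ngrams q.2 n)).count g else 0) := by
    apply List.map_congr_left
    intro q hq
    simp only [Function.comp]
    rw [List.count_replicate]
    by_cases h : q.1 = p.1 <;> simp [h]
  rw [hmap]
  exact sum_ite_eq_single (fun q => (PySem.List.dedup (generate_ngrams q.2 n)).count g)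
    (PySem.List.enumerate ws 0) (PySem.List.pairwise_lt_enumerate ws 0) p hp

-- the accumulated count for word index p.1 equals A's set-intersection overlap for p.2
lemma counts_eq_overlap (u : String) (ws : List String) (n : Int) (p : Int × String)
    (hp : p ∈ PySem.List.enumerate ws 0) :
    (((PySem.List.dedup (generate_ngrams u n)).map (fun g =>
        ((((PySem.List.enumerate ws 0).flatMap (fun q =>
            List.replicate ((PySem.List.dedup (generate_ngrams q.2 n)).count g) q.1)).count p.1 : Nat) : Int))).sum)
      = PySem.Set.len (PySem.Set.inter (PySem.Set.ofList (generate_ngrams u n))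
          (PySem.Set.ofList (generate_ngrams p.2 n))) := by
  have h1 : ((PySem.List.dedup (generate_ngrams u n)).map (fun g =>
        ((((PySem.List.enumerate ws 0).flatMap (fun q =>
            List.replicate ((PySem.List.dedup (generate_ngrams q.2 n)).count g) q.1)).count p.1 : Nat) : Int)))
      = (PySem.List.dedup (generate_ngrams u n)).map (fun g =>
        if (PySem.List.dedup (generate_ngrams p.2 n)).contains g then 1 else 0) := by
    apply List.map_congr_left
    intro g _
    rw [flat_count ws n p hp g,
        count_nodup_ite _ (PySem.List.nodup_dedup (generate_ngrams p.2 n)) g]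
  rw [h1, PySem.List.sum_map_ite_one_zero]
  simp only [PySem.Set.len, PySem.Set.inter, PySem.Set.contains, ← PySem.List.dedup_eq_ofList,
    List.countP_eq_length_filter]

-- ===== VERDICT (by name: the statement is the Claim_ definition above) =====
theorem find_nearest_word_by_ngram_spec : Claim_equal_find_nearest_word_by_ngram := by
  intro u ws n _
  unfold Spec_find_nearest_word_by_ngram
  unfold find_nearest_word_by_ngram find_nearest_word_by_ngram_alt
  simp only []
  congr 1
  have hidx : ∀ g, ((PySem.List.enumerate ws 0).foldl
      (fun d p => (PySem.List.dedup (generate_ngrams p.2 n)).foldl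
        (fun d g => d.modify g [] (fun l => l ++ [p.1])) d) PySem.Dict.empty).getD g []
      = (PySem.List.enumerate ws 0).flatMap (fun q =>
          List.replicate ((PySem.List.dedup (generate_ngrams q.2 n)).count g) q.1) := by
    intro g
    rw [index_fold n (PySem.List.enumerate ws 0) PySem.Dict.empty g, PySem.Dict.getD_empty,
      List.nil_append]
  have hcnt : ∀ p ∈ PySem.List.enumerate ws 0,
      ((PySem.List.dedup (generate_ngrams u n)).foldl
        (fun c g => (((PySem.List.enumerate ws 0).foldl
            (fun d p => (PySem.List.dedup (generate_ngrams p.2 n)).foldl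
              (fun d g => d.modify g [] (fun l => l ++ [p.1])) d) PySem.Dict.empty).getD g []).foldl
          (fun c i => c.insert i (c.getD i 0 + 1)) c) PySem.Dict.empty).getD p.1 0
      = PySem.Set.len (PySem.Set.inter (PySem.Set.ofList (generate_ngrams u n))
          (PySem.Set.ofList (generate_ngrams p.2 n))) := by
    intro p hp
    rw [counts_fold (PySem.List.dedup (generate_ngrams u n)) _ PySem.Dict.empty p.1,
      PySem.Dict.getD_empty]
    simp only [hidx]
    rw [counts_eq_overlap u ws n p hp]
    ring
  rw [PySem.List.foldl_congr_mem (PySem.List.enumerate ws 0) _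
    (fun (st : Int × Option String) (p : Int × String) =>
      let w_ngrams := PySem.Set.ofList (generate_ngrams p.2 n)
      let overlap : Int := PySem.Set.len (PySem.Set.inter (PySem.Set.ofList (generate_ngrams u n)) w_ngrams)
      if overlap > st.1 then (overlap, some p.2) else st) (0, none)
    (by intro acc p hp; simp only [hcnt p hp])]
  exact (final_fold ws _ 0 (0, none)).symm
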